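-- pv_equiv track=rewrite | github.com/Liudatuzi/tsp | tsp.py | belong_P
-- ===== SOURCE A (Python) =====
-- n = 10  # ten cities
--
-- def belong_P(v):
--     for i in range(n):
--         temp=0
--         for j in range(n):
--             if v[i*n+j]>1 or v[i*n+j]<0:
--                 return False
--             temp+=v[i*n+j]
--         if temp != 1:
--             return False
--     for j in range(n):
--         temp=0
--         for i in range(n):
--             temp+=v[i*n+j]
--         if temp!=1:
--             return False
--     return True
-- ===== SOURCE B (Python) =====
-- n = 10  # ten cities
--
-- def belong_P(v):
--     col = [0] * n
--     for i in range(n):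
--         temp = 0
--         for j in range(n):
--             x = v[i*n+j]
--             if x > 1 or x < 0:
--                 return False
--             temp += x
--             col[j] += x
--         if temp != 1:
--             return False
--     for j in range(n):
--         if col[j] != 1:
--             return False
--     return True
-- ===== Notes on version B (the rewrite author's own statement) =====
-- stated objective: alternative
-- what changed: Single fused pass over the matrix with a column-sum accumulator array replaces A's second quadratic column pass; the column check becomes a linear scan of the accumulator.
import Mathlib
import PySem

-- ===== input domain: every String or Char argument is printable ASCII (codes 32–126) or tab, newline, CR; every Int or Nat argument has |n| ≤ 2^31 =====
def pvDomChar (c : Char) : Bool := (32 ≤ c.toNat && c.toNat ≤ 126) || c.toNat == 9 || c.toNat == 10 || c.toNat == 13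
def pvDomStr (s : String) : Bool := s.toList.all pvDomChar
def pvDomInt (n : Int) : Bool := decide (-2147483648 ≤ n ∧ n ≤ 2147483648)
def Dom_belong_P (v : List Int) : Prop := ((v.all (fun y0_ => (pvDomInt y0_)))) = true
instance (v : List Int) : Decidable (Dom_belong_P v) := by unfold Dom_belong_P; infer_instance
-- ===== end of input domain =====

-- B fuses A's two quadratic passes into one pass with a column-sum accumulator; alternative decomposition, same asymptotic cost.

-- ===== PORT A =====
-- inner loop of pass 1: row i, remaining column indices js, running row total temp;
-- none = "return False" (or IndexError, which Pre_ excludes)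
def aRowLoop (v : List Int) (i : Nat) : List Nat → Int → Option Int
  | [], temp => some temp
  | j :: js, temp =>
    match PySem.List.pyGet? v ((i * 10 + j : Nat) : Int) with
    | none => none
    | some x => if x > 1 || x < 0 then none else aRowLoop v i js (temp + x)

-- outer loop of pass 1 over the row indices
def aRows (v : List Int) : List Nat → Bool
  | [] => true
  | i :: is =>
    match aRowLoop v i (List.range 10) 0 with
    | none => false
    | some temp => if temp ≠ 1 then false else aRows v is

-- inner loop of pass 2: column j, remaining row indices is  (none = IndexError, excluded by Pre_)
def aColLoop (v : List Int) (j : Nat) : List Nat → Int → Option Int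
  | [], temp => some temp
  | i :: is, temp =>
    match PySem.List.pyGet? v ((i * 10 + j : Nat) : Int) with
    | none => none
    | some x => aColLoop v j is (temp + x)

-- outer loop of pass 2 over the column indices
def aCols (v : List Int) : List Nat → Bool
  | [] => true
  | j :: js =>
    match aColLoop v j (List.range 10) 0 with
    | none => false
    | some temp => if temp ≠ 1 then false else aCols v js

def belong_P (v : List Int) : Bool :=
  if aRows v (List.range 10) then aCols v (List.range 10) else false

-- ===== PORT B =====
-- fused inner loop: row total temp plus the column accumulator col (col[j] += x)
def bRowLoop (v : List Int) (i : Nat) : List Nat → Int → List Int → Option (Int × List Int)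
  | [], temp, col => some (temp, col)
  | j :: js, temp, col =>
    match PySem.List.pyGet? v ((i * 10 + j : Nat) : Int) with
    | none => none
    | some x =>
      if x > 1 || x < 0 then none
      else bRowLoop v i js (temp + x) (col.set j (col.getD j 0 + x))

-- single pass over the rows threading the column accumulator
def bRows (v : List Int) : List Nat → List Int → Option (List Int)
  | [], col => some col
  | i :: is, col =>
    match bRowLoop v i (List.range 10) 0 col with
    | none => none
    | some (temp, col') => if temp ≠ 1 then none else bRows v is col'

-- final linear scan of the accumulator
def bCheck : List Nat → List Int → Bool
  | [], _ => true
  | j :: js, col => if col.getD j 0 ≠ 1 then false else bCheck js col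

def belong_P_alt (v : List Int) : Bool :=
  match bRows v (List.range 10) (List.replicate 10 0) with
  | none => false
  | some col => bCheck (List.range 10) col

-- ===== PRECONDITION & SPEC =====
-- Pre_ excludes exactly the inputs on which the Python A raises IndexError: lists shorter
-- than 100 whose scanned prefix never triggers an early `return False` (all entries in
-- {0..1} and every complete row summing to 1), so the scan runs off the end of the list.
def Pre_belong_P (v : List Int) : Prop :=
  ¬ (v.length < 100 ∧ (∀ x ∈ v, 0 ≤ x ∧ x ≤ 1) ∧
     ∀ i < v.length / 10, ((List.range 10).map (fun j => v.getD (i * 10 + j) 0)).sum = 1)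
instance (v : List Int) : Decidable (Pre_belong_P v) := by unfold Pre_belong_P; infer_instance

def pvWitness_belong_P : List Int := List.replicate 100 0

def Spec_belong_P (v : List Int) (out : Bool) : Prop := out = belong_P_alt v
instance (v : List Int) (out : Bool) : Decidable (Spec_belong_P v out) := by unfold Spec_belong_P; infer_instance

-- ===== CLAIM (what is proved, stated in full; the proofs are below) =====
def Claim_equal_belong_P : Prop := ∀ (v : List Int), Dom_belong_P v → Pre_belong_P v → Spec_belong_P v (belong_P v)

-- ===== LEMMAS AND PROOFS =====

-- contribution of the row-i reads at column positions js to accumulator slot j'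
def rowContrib (v : List Int) (i : Nat) (js : List Nat) (j' : Nat) : Int :=
  (js.map (fun j => if j' = j then v.getD (i * 10 + j) 0 else 0)).sum

-- column sum of v over rows is at column j
def colSum (v : List Int) (is : List Nat) (j : Nat) : Int :=
  (is.map (fun i => v.getD (i * 10 + j) 0)).sum

lemma rowContrib_range (v : List Int) (i : Nat) {j' : Nat} (h : j' < 10) :
    rowContrib v i (List.range 10) j' = v.getD (i * 10 + j') 0 := by
  interval_cases j' <;> simp [rowContrib, List.range_succ]

lemma row_corr (v : List Int) (i : Nat) :
    ∀ (js : List Nat) (temp : Int) (col : List Int), col.length = 10 → (∀ j ∈ js, j < 10) →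
    (aRowLoop v i js temp = none → bRowLoop v i js temp col = none) ∧
    (∀ t, aRowLoop v i js temp = some t →
      (∀ j ∈ js, i * 10 + j < v.length) ∧
      ∃ col', bRowLoop v i js temp col = some (t, col') ∧ col'.length = 10 ∧
        ∀ j' < 10, col'.getD j' 0 = col.getD j' 0 + rowContrib v i js j') := by
  intro js
  induction js with
  | nil =>
    intro temp col hcol _
    refine ⟨by simp [aRowLoop, bRowLoop], ?_⟩
    intro t ht
    simp [aRowLoop] at ht
    subst ht
    exact ⟨by simp, col, by simp [bRowLoop], hcol, by simp [rowContrib]⟩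
  | cons j js ih =>
    intro temp col hcol hjs
    have hj : j < 10 := hjs j (by simp)
    have hcast : ((i : Int) * 10 + (j : Int)) = ((i * 10 + j : Nat) : Int) := by push_cast; ring
    rcases hg : PySem.List.pyGet? v ((i : Int) * 10 + (j : Int)) with _ | x
    · constructor
      · intro _; simp [bRowLoop, hg]
      · intro t ht; simp [aRowLoop, hg] at ht
    · have hg' : PySem.List.pyGet? v ((i * 10 + j : Nat) : Int) = some x := by
        rw [← hcast]; exact hg
      have hlt : i * 10 + j < v.length := by
        by_contra hge
        rw [PySem.List.pyGet?_natCast] at hg'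
        simp [List.getElem?_eq_none (show v.length ≤ i * 10 + j by omega)] at hg'
      have hx : x = v.getD (i * 10 + j) 0 := by
        rw [PySem.List.pyGet?_natCast] at hg'
        simp [List.getD_eq_getElem?_getD, hg']
      by_cases hbad : (x > 1 || x < 0) = true
      · constructor
        · intro _; simp [bRowLoop, hg, hbad]
        · intro t ht; simp [aRowLoop, hg, hbad] at ht
      · have hb' := eq_false_of_ne_true hbad
        have hrec := ih (temp + x) (col.set j (col.getD j 0 + x))
          (by simp [hcol]) (fun j' hj' => hjs j' (by simp [hj']))
        constructor
        · intro ha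
          simp only [aRowLoop, hg', hb', Bool.false_eq_true, if_false] at ha
          simp only [bRowLoop, hg', hb', Bool.false_eq_true, if_false]
          exact hrec.1 ha
        · intro t ht
          simp only [aRowLoop, hg', hb', Bool.false_eq_true, if_false] at ht
          obtain ⟨hbnds, col', hcol'eq, hcol'len, hcol'val⟩ := hrec.2 t ht
          refine ⟨?_, col', ?_, hcol'len, ?_⟩
          · intro j' hj'
            rcases List.mem_cons.mp hj' with h | h
            · omega
            · exact hbnds j' h
          · simp only [bRowLoop, hg', hb', Bool.false_eq_true, if_false]
            exact hcol'eq
          · intro j' hj'10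
            have hset : (col.set j (col.getD j 0 + x)).getD j' 0 =
                if j' = j then col.getD j 0 + x else col.getD j' 0 := by
              by_cases hjj : j' = j
              · subst hjj
                simp [List.getD_eq_getElem?_getD, show j' < col.length by omega]
              · simp [List.getD_eq_getElem?_getD, hjj, Ne.symm hjj]
            have hcontrib : rowContrib v i (j :: js) j' =
                (if j' = j then v.getD (i * 10 + j) 0 else 0) + rowContrib v i js j' := by
              simp [rowContrib]
            rw [hcol'val j' hj'10, hset, hcontrib]
            by_cases hjj : j' = j
            · subst hjj
              rw [if_pos rfl, if_pos rfl, hx]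
              ring
            · rw [if_neg hjj, if_neg hjj]
              ring

lemma rows_corr (v : List Int) :
    ∀ (is : List Nat) (col : List Int), col.length = 10 →
    (aRows v is = false → bRows v is col = none) ∧
    (aRows v is = true →
      (∀ i ∈ is, ∀ j < 10, i * 10 + j < v.length) ∧
      ∃ col', bRows v is col = some col' ∧ col'.length = 10 ∧
        ∀ j' < 10, col'.getD j' 0 = col.getD j' 0 + colSum v is j') := by
  intro is
  induction is with
  | nil =>
    intro col hcol
    refine ⟨by simp [aRows], ?_⟩
    intro _
    exact ⟨by simp, col, by simp [bRows], hcol, by simp [colSum]⟩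
  | cons i is ih =>
    intro col hcol
    have hjsr : ∀ j ∈ List.range 10, j < 10 := by simp
    have hrow := row_corr v i (List.range 10) 0 col hcol hjsr
    rcases ha : aRowLoop v i (List.range 10) 0 with _ | temp
    · refine ⟨?_, ?_⟩
      · intro _; simp [bRows, hrow.1 ha]
      · intro hT; simp [aRows, ha] at hT
    · obtain ⟨hbnds, col', hcol'eq, hcol'len, hcol'val⟩ := hrow.2 temp ha
      by_cases h1 : temp = 1
      · subst h1
        have hrec := ih col' hcol'len
        refine ⟨?_, ?_⟩
        · intro hF
          simp only [aRows, ha] at hF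
          rw [if_neg (fun h => h rfl)] at hF
          simp only [bRows, hcol'eq]
          rw [if_neg (fun h => h rfl)]
          exact hrec.1 hF
        · intro hT
          simp only [aRows, ha] at hT
          rw [if_neg (fun h => h rfl)] at hT
          obtain ⟨hbnds', col'', hc''eq, hc''len, hc''val⟩ := hrec.2 hT
          refine ⟨?_, col'', ?_, hc''len, ?_⟩
          · intro i' hi' j hj
            rcases List.mem_cons.mp hi' with h | h
            · subst h; exact hbnds j (by simp [hj])
            · exact hbnds' i' h j hj
          · simp only [bRows, hcol'eq]
            rw [if_neg (fun h => h rfl)]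
            exact hc''eq
          · intro j' hj'
            have : colSum v (i :: is) j' = v.getD (i * 10 + j') 0 + colSum v is j' := by
              simp [colSum]
            rw [hc''val j' hj', hcol'val j' hj', rowContrib_range v i hj', this]
            ring
      · refine ⟨?_, ?_⟩
        · intro _
          simp only [bRows, hcol'eq]
          rw [if_pos h1]
        · intro hT
          simp [aRows, ha, h1] at hT
  
lemma colLoop_some (v : List Int) (j : Nat) :
    ∀ (is : List Nat) (temp : Int), (∀ i ∈ is, i * 10 + j < v.length) →
    aColLoop v j is temp = some (temp + colSum v is j) := by
  intro is
  induction is with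
  | nil => intro temp _; simp [aColLoop, colSum]
  | cons i is ih =>
    intro temp h
    have hlt : i * 10 + j < v.length := h i (by simp)
    have hg : PySem.List.pyGet? v ((i * 10 + j : Nat) : Int) = some (v.getD (i * 10 + j) 0) := by
      rw [PySem.List.pyGet?_natCast]
      simp [List.getD_eq_getElem?_getD, List.getElem?_eq_getElem hlt]
    rw [aColLoop, hg]
    show aColLoop v j is (temp + v.getD (i * 10 + j) 0) = _
    rw [ih (temp + v.getD (i * 10 + j) 0) (fun i' hi' => h i' (by simp [hi']))]
    simp [colSum]
    ring

lemma check_corr (v : List Int) (col : List Int)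
    (hb : ∀ i < 10, ∀ j < 10, i * 10 + j < v.length)
    (hcol : ∀ j < 10, col.getD j 0 = colSum v (List.range 10) j) :
    ∀ js : List Nat, (∀ j ∈ js, j < 10) → aCols v js = bCheck js col := by
  intro js
  induction js with
  | nil => intro _; simp [aCols, bCheck]
  | cons j js ih =>
    intro hjs
    have hj : j < 10 := hjs j (by simp)
    have hcl := colLoop_some v j (List.range 10) 0
      (fun i hi => hb i (by simpa using hi) j hj)
    rw [aCols, hcl, bCheck, hcol j hj]
    by_cases h1 : colSum v (List.range 10) j = 1
    · simp [h1]
      exact ih (fun j' hj' => hjs j' (by simp [hj']))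
    · simp [h1]

lemma belong_eq (v : List Int) : belong_P v = belong_P_alt v := by
  have hrows := rows_corr v (List.range 10) (List.replicate 10 0) (by simp)
  rcases hA : aRows v (List.range 10) with _ | _
  · rw [belong_P, belong_P_alt, hA, hrows.1 hA]
    simp
  · obtain ⟨hbnds, col', hcol'eq, _, hcol'val⟩ := hrows.2 hA
    have hb : ∀ i < 10, ∀ j < 10, i * 10 + j < v.length := by
      intro i hi j hj
      exact hbnds i (by simp [hi]) j hj
    have hcolv : ∀ j < 10, col'.getD j 0 = colSum v (List.range 10) j := by
      intro j hj
      rw [hcol'val j hj]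
      have h0 : (List.replicate 10 (0 : Int)).getD j 0 = 0 := by
        interval_cases j <;> rfl
      rw [h0, zero_add]
    rw [belong_P, belong_P_alt, hA, hcol'eq]
    simp only [if_true]
    exact check_corr v col' hb hcolv (List.range 10) (by simp)

-- ===== VERDICT (by name: the statement is the Claim_ definition above) =====
theorem belong_P_spec : Claim_equal_belong_P := by
  intro v _ _
  unfold Spec_belong_P
  exact belong_eq v
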